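-- pv_equiv track=rewrite | github.com/fff01/TE- | scripts/clean_tekg2_standardized_jsonl.py | clean_relations
-- ===== SOURCE A (Python) =====
-- def norm(value) -> str:
--     return " ".join(str(value or "").split()).strip()
--
-- def norm_key(value: str) -> str:
--     return norm(value).casefold()
--
-- def clean_relations(items):
--     cleaned = []
--     seen = {}
--     dropped_missing_endpoint = 0
--     duplicates_merged = 0
--
--     for item in items or []:
--         source = norm(item.get("source", ""))
--         relation = norm(item.get("relation", ""))
--         target = norm(item.get("target", ""))
--         description = norm(item.get("description", ""))
--
--         if not source or not relation or not target:
--             dropped_missing_endpoint += 1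
--             continue
--
--         payload = {
--             "source": source,
--             "relation": relation,
--             "target": target,
--             "description": description,
--         }
--         key = (
--             norm_key(source),
--             norm_key(relation),
--             norm_key(target),
--         )
--         if key in seen:
--             duplicates_merged += 1
--             existing = cleaned[seen[key]]
--             if not existing.get("description") and description:
--                 existing["description"] = description
--             continue
--
--         seen[key] = len(cleaned)
--         cleaned.append(payload)
--
--     return cleaned, dropped_missing_endpoint, duplicates_merged
-- ===== SOURCE B (Python) =====
-- def norm(value) -> str:
--     return " ".join(str(value or "").split()).strip()
--
-- def norm_key(value: str) -> str:
--     return norm(value).casefold()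
--
-- def clean_relations(items):
--     # Pass 1: normalize every record into a flat row.
--     rows = []
--     for item in (items or []):
--         rows.append((norm(item.get("source", "")), norm(item.get("relation", "")),
--                      norm(item.get("target", "")), norm(item.get("description", ""))))
--
--     # Pass 2: keep complete rows, tagged with their normalized key.
--     kept = [((norm_key(s), norm_key(r), norm_key(t)), s, r, t, d)
--             for (s, r, t, d) in rows if s and r and t]
--     dropped_missing_endpoint = len(rows) - len(kept)
--
--     # Pass 3: first non-empty description per key.
--     first_desc = {}
--     for key, s, r, t, d in kept:
--         if d and key not in first_desc:
--             first_desc[key] = d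
--
--     # Pass 4: emit first occurrence of each key with that description.
--     cleaned = []
--     emitted = set()
--     for key, s, r, t, d in kept:
--         if key not in emitted:
--             emitted.add(key)
--             cleaned.append({"source": s, "relation": r, "target": t,
--                             "description": first_desc.get(key, "")})
--
--     return cleaned, dropped_missing_endpoint, len(kept) - len(cleaned)
-- ===== Notes on version B (the rewrite author's own statement) =====
-- stated objective: alternative
-- what changed: A is one pass that mutates its output list in place (backfilling descriptions through a key->index dict and incrementing counters as it goes); B is a staged pipeline of four independent passes -- normalize all rows, filter complete ones, build a first-non-empty-description map, then emit first occurrences -- with both counters derived arithmetically from list lengths, and never mutates a record after emitting it.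
import Mathlib
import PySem

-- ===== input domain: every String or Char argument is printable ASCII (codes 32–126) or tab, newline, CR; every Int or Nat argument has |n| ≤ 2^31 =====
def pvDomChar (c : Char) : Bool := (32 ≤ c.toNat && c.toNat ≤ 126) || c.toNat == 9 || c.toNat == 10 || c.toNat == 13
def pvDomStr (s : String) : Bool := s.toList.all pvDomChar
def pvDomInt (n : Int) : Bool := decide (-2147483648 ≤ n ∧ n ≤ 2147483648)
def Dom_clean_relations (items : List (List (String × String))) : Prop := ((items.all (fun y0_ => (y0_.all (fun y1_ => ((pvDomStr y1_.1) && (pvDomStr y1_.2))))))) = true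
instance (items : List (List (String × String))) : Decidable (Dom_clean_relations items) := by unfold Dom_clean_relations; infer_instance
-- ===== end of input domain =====

-- B replaces A's single mutating pass (output list backfilled in place through a key→index dict,
-- counters incremented in the loop) by a staged pipeline: normalize rows, filter complete ones,
-- build a first-non-empty-description map, emit first occurrences; counters from list lengths.

-- ===== PORT A =====
-- norm(value) for a string value: " ".join(value.split()).strip()  ('value or ""' is the identity on str)
def normS (s : String) : String :=
  PySem.Str.strip (PySem.Str.join " " (PySem.Str.split₀ s))

-- norm_key: str.casefold coincides with str.lower on the ASCII domain Dom_clean_relations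
def normKey (s : String) : String :=
  PySem.Str.lower (normS s)

-- one iteration of A's for-loop; state = (cleaned, seen, dropped_missing_endpoint, duplicates_merged)
def cleanStepA
    (st : List (List (String × String)) × PySem.Dict (String × String × String) Int × Int × Int)
    (item : List (String × String)) :
    List (List (String × String)) × PySem.Dict (String × String × String) Int × Int × Int :=
  let cleaned := st.1
  let seen := st.2.1
  let dropped := st.2.2.1
  let merged := st.2.2.2
  let source := normS ((PySem.Dict.mk item).getD "source" "")
  let relation := normS ((PySem.Dict.mk item).getD "relation" "")
  let target := normS ((PySem.Dict.mk item).getD "target" "")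
  let description := normS ((PySem.Dict.mk item).getD "description" "")
  if source = "" ∨ relation = "" ∨ target = "" then
    (cleaned, seen, dropped + 1, merged)
  else
    let payload : List (String × String) :=
      [("source", source), ("relation", relation), ("target", target), ("description", description)]
    let key := (normKey source, normKey relation, normKey target)
    match seen.get? key with
    | some i =>
        -- cleaned[seen[key]]: seen stores len(cleaned) at insertion time, a valid nonnegative index
        let existing := cleaned.getD i.toNat []
        let cleaned' :=
          if (PySem.Dict.mk existing).getD "description" "" = "" ∧ description ≠ "" then
            cleaned.set i.toNat ((PySem.Dict.mk existing).insert "description" description).items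
          else cleaned
        (cleaned', seen, dropped, merged + 1)
    | none =>
        (cleaned ++ [payload], seen.insert key (cleaned.length : Int), dropped, merged)

def clean_relations (items : List (List (String × String))) :
    (List (List (String × String))) × Int × Int :=
  let st := items.foldl cleanStepA ([], PySem.Dict.empty, 0, 0)
  (st.1, st.2.2.1, st.2.2.2)

-- ===== PORT B =====
-- pass 1: the normalized row of one input record
def rowOf (item : List (String × String)) : String × String × String × String :=
  (normS ((PySem.Dict.mk item).getD "source" ""),
   normS ((PySem.Dict.mk item).getD "relation" ""),
   normS ((PySem.Dict.mk item).getD "target" ""),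
   normS ((PySem.Dict.mk item).getD "description" ""))

-- pass 2: complete rows, tagged with their normalized key ('kept' in Source B)
def keptOf (items : List (List (String × String))) :
    List ((String × String × String) × String × String × String × String) :=
  ((items.map rowOf).filter
      (fun r => decide (¬(r.1 = "" ∨ r.2.1 = "" ∨ r.2.2.1 = "")))).map
    (fun r => ((normKey r.1, normKey r.2.1, normKey r.2.2.1), r))

-- pass 3 step: first non-empty description per key
def fdStep (m : PySem.Dict (String × String × String) String)
    (x : (String × String × String) × String × String × String × String) :
    PySem.Dict (String × String × String) String :=
  if x.2.2.2.2 ≠ "" ∧ ¬ m.contains x.1 then m.insert x.1 x.2.2.2.2 else m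

-- the output record built in pass 4
def mkPayload (r : String × String × String × String) (desc : String) :
    List (String × String) :=
  [("source", r.1), ("relation", r.2.1), ("target", r.2.2.1), ("description", desc)]

-- pass 4 step: emit the first occurrence of each key; state = (cleaned, emitted)
def emitStep (m : PySem.Dict (String × String × String) String)
    (st : List (List (String × String)) × PySem.Set (String × String × String))
    (x : (String × String × String) × String × String × String × String) :
    List (List (String × String)) × PySem.Set (String × String × String) :=
  if PySem.Set.contains st.2 x.1 then st
  else (st.1 ++ [mkPayload x.2 (m.getD x.1 "")], PySem.Set.add st.2 x.1)

def clean_relations_alt (items : List (List (String × String))) :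
    (List (List (String × String))) × Int × Int :=
  let rows := items.map rowOf
  let kept := keptOf items
  let dropped : Int := (rows.length : Int) - (kept.length : Int)
  let fd := kept.foldl fdStep PySem.Dict.empty
  let ce := kept.foldl (emitStep fd) ([], PySem.Set.empty)
  (ce.1, dropped, (kept.length : Int) - (ce.1.length : Int))

-- ===== PRECONDITION & SPEC =====
def Spec_clean_relations (items : List (List (String × String))) (out : (List (List (String × String))) × Int × Int) : Prop := out = clean_relations_alt items
instance (items : List (List (String × String))) (out : (List (List (String × String))) × Int × Int) : Decidable (Spec_clean_relations items out) := by unfold Spec_clean_relations; infer_instance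

-- ===== CLAIM (what is proved, stated in full; the proofs are below) =====
def Claim_equal_clean_relations : Prop := ∀ (items : List (List (String × String))), Dom_clean_relations items → Spec_clean_relations items (clean_relations items)

-- ===== LEMMAS AND PROOFS =====

-- the keys of kp in first-occurrence order
def dk (kp : List ((String × String × String) × String × String × String × String)) :
    List (String × String × String) :=
  PySem.Set.ofList (kp.map (·.1))

-- fields of the first row of kp carrying key k
def firstRow (kp : List ((String × String × String) × String × String × String × String))
    (k : String × String × String) : String × String × String × String :=
  match kp with
  | [] => ("", "", "", "")
  | x :: t => if x.1 = k then x.2 else firstRow t k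

-- first non-empty description among rows of kp with key k ("" if none)
def firstDesc (kp : List ((String × String × String) × String × String × String × String))
    (k : String × String × String) : String :=
  match kp with
  | [] => ""
  | x :: t => if x.1 = k ∧ x.2.2.2.2 ≠ "" then x.2.2.2.2 else firstDesc t k

theorem dk_append_singleton
    (kp : List ((String × String × String) × String × String × String × String))
    (x : (String × String × String) × String × String × String × String) :
    dk (kp ++ [x]) = PySem.Set.add (dk kp) x.1 := by
  simp [dk, PySem.Set.ofList_append_singleton]

theorem mem_dk (kp : List ((String × String × String) × String × String × String × String))
    (k : String × String × String) : k ∈ dk kp ↔ k ∈ kp.map (·.1) := by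
  simp [dk, PySem.Set.mem_ofList]

theorem nodup_dk (kp : List ((String × String × String) × String × String × String × String)) :
    (dk kp).Nodup := PySem.Set.nodup_ofList _

theorem firstRow_append
    (kp : List ((String × String × String) × String × String × String × String))
    (x : (String × String × String) × String × String × String × String)
    (k : String × String × String) :
    firstRow (kp ++ [x]) k =
      if k ∈ kp.map (·.1) then firstRow kp k
      else if x.1 = k then x.2 else ("", "", "", "") := by
  induction kp with
  | nil => simp [firstRow]
  | cons y t ih =>
      by_cases h : y.1 = k
      · simp [firstRow, h]
      · have hne : ¬ k = y.1 := fun he => h he.symm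
        simp only [List.cons_append, firstRow, if_neg h, ih, List.map_cons]
        rw [if_congr (show (k ∈ y.1 :: List.map (fun x => x.1) t) ↔ (k ∈ List.map (fun x => x.1) t) from by simp only [List.mem_cons, hne, false_or]) rfl rfl]

theorem firstDesc_append
    (kp : List ((String × String × String) × String × String × String × String))
    (x : (String × String × String) × String × String × String × String)
    (k : String × String × String) :
    firstDesc (kp ++ [x]) k =
      if firstDesc kp k = "" then
        (if x.1 = k ∧ x.2.2.2.2 ≠ "" then x.2.2.2.2 else "")
      else firstDesc kp k := by
  induction kp with
  | nil => simp [firstDesc]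
  | cons y t ih =>
      by_cases h : y.1 = k ∧ y.2.2.2.2 ≠ ""
      · simp [firstDesc, h]
      · simp [firstDesc, if_neg h, ih]

-- the first-non-empty-description dict computes firstDesc
theorem fd_get? (kp : List ((String × String × String) × String × String × String × String))
    (k : String × String × String) :
    (kp.foldl fdStep PySem.Dict.empty).get? k =
      if firstDesc kp k = "" then none else some (firstDesc kp k) := by
  induction kp using List.reverseRecOn generalizing k with
  | nil => simp [firstDesc, PySem.Dict.get?_empty]
  | append_singleton kp x ih =>
      rw [List.foldl_append, List.foldl_cons, List.foldl_nil, firstDesc_append]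
      rw [fdStep.eq_def]
      by_cases hc : x.2.2.2.2 ≠ "" ∧ ¬ (kp.foldl fdStep PySem.Dict.empty).contains x.1
      · rw [if_pos hc]
        have hnone : firstDesc kp x.1 = "" := by
          have h := ih x.1
          rw [PySem.Dict.contains_eq_isSome_get?, h] at hc
          by_contra hne
          rw [if_neg hne] at hc
          exact hc.2 rfl
        rw [PySem.Dict.get?_insert]
        by_cases hk : k = x.1
        · subst hk
          simp [hnone, hc.1]
        · rw [if_neg hk, ih k]
          have hx : ¬ (x.1 = k ∧ x.2.2.2.2 ≠ "") := fun h => hk h.1.symm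
          by_cases hf : firstDesc kp k = ""
          · simp [hf, hx]
          · simp [hf]
      · rw [if_neg hc, ih k]
        by_cases hf : firstDesc kp k = ""
        · rw [if_pos hf, hf, if_pos rfl]
          by_cases hx : x.1 = k ∧ x.2.2.2.2 ≠ ""
          · exfalso
            push Not at hc
            have hcont := hc hx.2
            rw [PySem.Dict.contains_eq_isSome_get?, ih x.1] at hcont
            rw [← hx.1] at hf
            rw [if_pos hf] at hcont
            simp at hcont
          · rw [if_neg hx, if_pos rfl]
        · simp [hf]

-- the emit pass computes the map over first-occurrence keys
theorem emit_spec (m : PySem.Dict (String × String × String) String)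
    (kp : List ((String × String × String) × String × String × String × String)) :
    kp.foldl (emitStep m) ([], PySem.Set.empty) =
      ((dk kp).map (fun k => mkPayload (firstRow kp k) (m.getD k "")), dk kp) := by
  induction kp using List.reverseRecOn with
  | nil => simp [dk]
  | append_singleton kp x ih =>
      rw [List.foldl_append, List.foldl_cons, List.foldl_nil, ih]
      rw [emitStep.eq_def]
      have hdk : dk (kp ++ [x]) = PySem.Set.add (dk kp) x.1 := dk_append_singleton kp x
      by_cases hm : x.1 ∈ dk kp
      · rw [if_pos (by simpa [PySem.Set.contains_iff] using hm)]
        rw [hdk, PySem.Set.add_of_mem hm]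
        refine Prod.ext ?_ rfl
        simp only
        apply List.map_congr_left
        intro k hk
        rw [firstRow_append, if_pos ((mem_dk kp k).mp hk)]
      · rw [if_neg (by simpa [PySem.Set.contains_iff] using hm)]
        rw [hdk, PySem.Set.add_of_not_mem hm]
        refine Prod.ext ?_ rfl
        simp only [List.map_append, List.map_cons, List.map_nil]
        congr 1
        · apply List.map_congr_left
          intro k hk
          rw [firstRow_append, if_pos ((mem_dk kp k).mp hk)]
        · rw [firstRow_append, if_neg (fun h => hm ((mem_dk kp x.1).mpr h)), if_pos rfl]

-- A's 'seen' dict, reconstructed from the first-occurrence keys: key ↦ its position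
def chseen (ks : List (String × String × String)) (n : Nat) : List ((String × String × String) × Int) :=
  match ks with
  | [] => []
  | k :: ks => (k, (n : Int)) :: chseen ks (n + 1)

theorem chseen_append (ks : List (String × String × String)) (k : String × String × String) (n : Nat) :
    chseen (ks ++ [k]) n = chseen ks n ++ [(k, ((n + ks.length : Nat) : Int))] := by
  induction ks generalizing n with
  | nil => simp [chseen]
  | cons a t ih => simp [chseen, ih (n + 1)]; ring_nf

theorem get?_chseen_of_not_mem (ks : List (String × String × String)) (n : Nat)
    (k : String × String × String) (h : k ∉ ks) :
    (PySem.Dict.mk (chseen ks n)).get? k = none := by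
  induction ks generalizing n with
  | nil => simp [chseen, PySem.Dict.get?]
  | cons a t ih =>
      rw [chseen, PySem.Dict.get?_mk_cons]
      simp only [List.mem_cons, not_or] at h
      simp [ih (n + 1) h.2]
      intro hc; exact absurd (by exact_mod_cast hc.symm) h.1

theorem get?_chseen_of_getElem (ks : List (String × String × String)) (n i : Nat)
    (k : String × String × String) (hnd : ks.Nodup) (h : ks[i]? = some k) :
    (PySem.Dict.mk (chseen ks n)).get? k = some ((n + i : Nat) : Int) := by
  induction ks generalizing n i with
  | nil => simp at h
  | cons a t ih =>
      rw [chseen, PySem.Dict.get?_mk_cons]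
      cases i with
      | zero =>
          simp at h
          simp [h]
      | succ j =>
          simp only [List.getElem?_cons_succ] at h
          have hk : k ∈ t := List.mem_of_getElem? h
          have hne : ¬ (a == k) = true := by
            simp; intro he; subst he; exact (List.nodup_cons.mp hnd).1 hk
          rw [if_neg hne, ih (n + 1) j (List.nodup_cons.mp hnd).2 h]
          congr 2
          omega

-- description field of a payload
theorem getD_mkPayload (r : String × String × String × String) (desc : String) :
    (PySem.Dict.mk (mkPayload r desc)).getD "description" "" = desc := by
  simp [mkPayload, PySem.Dict.getD_eq_get?_getD, PySem.Dict.get?_mk_cons]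

-- overwriting the description field of a payload
theorem insert_mkPayload (r : String × String × String × String) (desc d : String) :
    ((PySem.Dict.mk (mkPayload r desc)).insert "description" d).items = mkPayload r d := by
  rw [PySem.Dict.items_insert]
  simp [mkPayload, PySem.Dict.contains]

-- a map whose function changes only at the element at index i is a set
theorem map_eq_set {α : Type} (l : List (String × String × String)) (i : Nat)
    (k : String × String × String) (f g : String × String × String → α)
    (hnd : l.Nodup) (h : l[i]? = some k)
    (hfg : ∀ k' ∈ l, k' ≠ k → f k' = g k') :
    l.map g = (l.map f).set i (g k) := by
  induction l generalizing i with
  | nil => simp at h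
  | cons a t ih =>
      cases i with
      | zero =>
          simp at h; subst h
          simp only [List.map_cons, List.set_cons_zero, List.cons.injEq, true_and]
          apply List.map_congr_left
          intro k' hk'
          exact (hfg k' (List.mem_cons_of_mem _ hk')
            (fun he => (List.nodup_cons.mp hnd).1 (he ▸ hk'))).symm
      | succ j =>
          simp only [List.getElem?_cons_succ] at h
          simp only [List.map_cons, List.set_cons_succ, List.cons.injEq]
          have hk : k ∈ t := List.mem_of_getElem? h
          refine ⟨(hfg a (List.mem_cons_self) (fun he => (List.nodup_cons.mp hnd).1 (by rw [he]; exact hk))).symm, ?_⟩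
          exact ih j (List.nodup_cons.mp hnd).2 h (fun k' h1 h2 => hfg k' (List.mem_cons_of_mem _ h1) h2)

-- the loop invariant: A's state after a prefix, characterized by dk/firstRow/firstDesc of kept rows
def AInv (items : List (List (String × String))) : Prop :=
  let st := items.foldl cleanStepA ([], PySem.Dict.empty, 0, 0)
  let kp := keptOf items
  st.1 = (dk kp).map (fun k => mkPayload (firstRow kp k) (firstDesc kp k)) ∧
  st.2.1 = PySem.Dict.mk (chseen (dk kp) 0) ∧
  st.2.2.1 = (items.length : Int) - (kp.length : Int) ∧
  st.2.2.2 = (kp.length : Int) - ((dk kp).length : Int)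

theorem keptOf_append_singleton (items : List (List (String × String)))
    (item : List (String × String)) :
    keptOf (items ++ [item]) = keptOf items ++ keptOf [item] := by
  simp [keptOf]

theorem firstDesc_empty_of_not_mem
    (kp : List ((String × String × String) × String × String × String × String))
    (k : String × String × String) (h : k ∉ kp.map (·.1)) : firstDesc kp k = "" := by
  induction kp with
  | nil => rfl
  | cons y t ih =>
      simp only [List.map_cons, List.mem_cons, not_or] at h
      rw [firstDesc, if_neg (fun hc => h.1 hc.1.symm)]
      exact ih h.2

theorem firstDesc_stable
    (kp : List ((String × String × String) × String × String × String × String))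
    (x : (String × String × String) × String × String × String × String)
    (k : String × String × String) (hne : x.1 ≠ k) :
    firstDesc (kp ++ [x]) k = firstDesc kp k := by
  rw [firstDesc_append]
  by_cases hf : firstDesc kp k = ""
  · simp [hf, hne]
  · simp [hf]

set_option maxHeartbeats 1600000 in
theorem AInv_all (items : List (List (String × String))) : AInv items := by
  induction items using List.reverseRecOn with
  | nil => exact ⟨rfl, rfl, rfl, rfl⟩
  | append_singleton items item ih =>
      obtain ⟨h1, h2, h3, h4⟩ := ih
      unfold AInv
      rw [List.foldl_append, List.foldl_cons, List.foldl_nil, keptOf_append_singleton]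
      rw [cleanStepA.eq_def]
      set st := items.foldl cleanStepA ([], PySem.Dict.empty, 0, 0) with hst
      set kp := keptOf items with hkp
      by_cases hcond : normS ((PySem.Dict.mk item).getD "source" "") = "" ∨
          normS ((PySem.Dict.mk item).getD "relation" "") = "" ∨
          normS ((PySem.Dict.mk item).getD "target" "") = ""
      · -- dropped row: kept rows unchanged
        have hp : decide (¬((rowOf item).1 = "" ∨ (rowOf item).2.1 = "" ∨ (rowOf item).2.2.1 = "")) = false := by
          rw [decide_eq_false_iff_not, Decidable.not_not]
          exact hcond
        have hk1 : keptOf [item] = [] := by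
          unfold keptOf
          rw [List.map_cons, List.map_nil, List.filter_cons, hp]
          simp
        rw [hk1, List.append_nil, if_pos hcond]
        refine ⟨h1, h2, ?_, h4⟩
        simp only [List.length_append, List.length_cons, List.length_nil]
        rw [h3]; push_cast; ring
      · -- kept row x
        have hk1 : keptOf [item] =
            [((normKey (normS ((PySem.Dict.mk item).getD "source" "")),
               normKey (normS ((PySem.Dict.mk item).getD "relation" "")),
               normKey (normS ((PySem.Dict.mk item).getD "target" ""))),
              (normS ((PySem.Dict.mk item).getD "source" ""),
               normS ((PySem.Dict.mk item).getD "relation" ""),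
               normS ((PySem.Dict.mk item).getD "target" ""),
               normS ((PySem.Dict.mk item).getD "description" "")))] := by
          have hp : decide (¬((rowOf item).1 = "" ∨ (rowOf item).2.1 = "" ∨ (rowOf item).2.2.1 = "")) = true := by
            rw [decide_eq_true_eq]
            exact hcond
          unfold keptOf
          rw [List.map_cons, List.map_nil, List.filter_cons, hp]
          simp [rowOf]
        rw [hk1, if_neg hcond]
        set ky := (normKey (normS ((PySem.Dict.mk item).getD "source" "")),
               normKey (normS ((PySem.Dict.mk item).getD "relation" "")),
               normKey (normS ((PySem.Dict.mk item).getD "target" ""))) with hky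
        set rrow := (normS ((PySem.Dict.mk item).getD "source" ""),
               normS ((PySem.Dict.mk item).getD "relation" ""),
               normS ((PySem.Dict.mk item).getD "target" ""),
               normS ((PySem.Dict.mk item).getD "description" "")) with hrrow
        dsimp only
        have hdesc : (ky, rrow).2.2.2.2 = normS ((PySem.Dict.mk item).getD "description" "") := by
          rw [hrrow]
        by_cases hmem : ky ∈ dk kp
        · -- duplicate key: A backfills in place
          obtain ⟨i, hi⟩ := List.mem_iff_getElem?.mp hmem
          have hget : st.2.1.get? ky = some ((i : Nat) : Int) := by
            rw [h2]
            have h := get?_chseen_of_getElem (dk kp) 0 i ky (nodup_dk kp) hi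
            simpa using h
          rw [hget]
          dsimp only
          rw [Int.toNat_natCast]
          have hcl : st.1.getD i [] = mkPayload (firstRow kp ky) (firstDesc kp ky) := by
            rw [h1, List.getD_eq_getElem?_getD, List.getElem?_map, hi]
            rfl
          rw [hcl, getD_mkPayload, insert_mkPayload]
          have hdk : dk (kp ++ [(ky, rrow)]) = dk kp := by
            rw [dk_append_singleton]
            exact PySem.Set.add_of_mem hmem
          have hstable : ∀ k' ∈ dk kp, k' ≠ ky →
              mkPayload (firstRow kp k') (firstDesc kp k') =
              mkPayload (firstRow (kp ++ [(ky, rrow)]) k') (firstDesc (kp ++ [(ky, rrow)]) k') := by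
            intro k' hk' hne
            rw [firstRow_append, if_pos ((mem_dk kp k').mp hk'),
                firstDesc_stable kp (ky, rrow) k' (fun h => hne h.symm)]
          refine ⟨?_, by rw [hdk]; exact h2, ?_, ?_⟩
          · rw [hdk]
            by_cases hupd : firstDesc kp ky = "" ∧ normS ((PySem.Dict.mk item).getD "description" "") ≠ ""
            · rw [if_pos hupd, h1]
              have hnew : mkPayload (firstRow (kp ++ [(ky, rrow)]) ky) (firstDesc (kp ++ [(ky, rrow)]) ky) =
                  mkPayload (firstRow kp ky) (normS ((PySem.Dict.mk item).getD "description" "")) := by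
                rw [firstRow_append, if_pos ((mem_dk kp ky).mp hmem), firstDesc_append, hdesc,
                    if_pos hupd.1, if_pos (show (ky, rrow).1 = ky ∧
                      normS ((PySem.Dict.mk item).getD "description" "") ≠ "" from ⟨rfl, hupd.2⟩)]
              rw [← hnew]
              exact (map_eq_set (dk kp) i ky _ _ (nodup_dk kp) hi hstable).symm
            · rw [if_neg hupd]
              rw [h1]
              apply List.map_congr_left
              intro k' hk'
              by_cases hne : k' = ky
              · rw [hne]
                rw [firstRow_append, if_pos ((mem_dk kp ky).mp hmem), firstDesc_append, hdesc]
                by_cases hf : firstDesc kp ky = ""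
                · rw [if_pos hf]
                  have hd : ¬ normS ((PySem.Dict.mk item).getD "description" "") ≠ "" := fun hd => hupd ⟨hf, hd⟩
                  rw [Decidable.not_not] at hd
                  rw [if_neg (show ¬((ky, rrow).1 = ky ∧
                      normS ((PySem.Dict.mk item).getD "description" "") ≠ "") from fun hc => hc.2 hd), hf]
                · rw [if_neg hf]
              · exact hstable k' hk' hne
          · rw [h3]
            simp only [List.length_append, List.length_cons, List.length_nil]
            push_cast; ring
          · rw [h4, hdk]
            simp only [List.length_append, List.length_cons, List.length_nil]
            push_cast; ring
        · -- fresh key: A appends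
          have hget : st.2.1.get? ky = none := by
            rw [h2]
            exact get?_chseen_of_not_mem (dk kp) 0 ky hmem
          rw [hget]
          dsimp only
          have hdk : dk (kp ++ [(ky, rrow)]) = dk kp ++ [ky] := by
            rw [dk_append_singleton]
            exact PySem.Set.add_of_not_mem hmem
          have hnotm : ky ∉ kp.map (·.1) := fun h => hmem ((mem_dk kp ky).mpr h)
          refine ⟨?_, ?_, ?_, ?_⟩
          · rw [hdk, List.map_append, List.map_cons, List.map_nil, h1]
            have hpre : List.map (fun k => mkPayload (firstRow (kp ++ [(ky, rrow)]) k)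
                  (firstDesc (kp ++ [(ky, rrow)]) k)) (dk kp) =
                List.map (fun k => mkPayload (firstRow kp k) (firstDesc kp k)) (dk kp) := by
              apply List.map_congr_left
              intro k' hk'
              have hne : k' ≠ ky := fun he => hmem (he ▸ hk')
              rw [firstRow_append, if_pos ((mem_dk kp k').mp hk'),
                  firstDesc_stable kp (ky, rrow) k' (fun h => hne h.symm)]
            rw [hpre]
            have hlast : mkPayload (firstRow (kp ++ [(ky, rrow)]) ky)
                (firstDesc (kp ++ [(ky, rrow)]) ky) =
                [("source", normS ((PySem.Dict.mk item).getD "source" "")),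
                 ("relation", normS ((PySem.Dict.mk item).getD "relation" "")),
                 ("target", normS ((PySem.Dict.mk item).getD "target" "")),
                 ("description", normS ((PySem.Dict.mk item).getD "description" ""))] := by
              rw [firstRow_append, if_neg hnotm, firstDesc_append, hdesc,
                  if_pos (firstDesc_empty_of_not_mem kp ky hnotm),
                  if_pos (show (ky, rrow).1 = ky from rfl)]
              by_cases hd : normS ((PySem.Dict.mk item).getD "description" "") = ""
              · rw [if_neg (show ¬((ky, rrow).1 = ky ∧
                    normS ((PySem.Dict.mk item).getD "description" "") ≠ "") from fun hc => hc.2 hd)]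
                simp [mkPayload, hrrow, hd]
              · rw [if_pos (show (ky, rrow).1 = ky ∧
                    normS ((PySem.Dict.mk item).getD "description" "") ≠ "" from ⟨rfl, hd⟩)]
                simp [mkPayload, hrrow]
            rw [hlast]
          · rw [hdk, chseen_append, h2, h1]
            have hcont : (PySem.Dict.mk (chseen (dk kp) 0) : PySem.Dict (String × String × String) Int).contains ky = false := by
              rw [PySem.Dict.contains_eq_isSome_get?, get?_chseen_of_not_mem (dk kp) 0 ky hmem]
              rfl
            apply PySem.Dict.ext
            rw [PySem.Dict.items_insert_of_not_contains _ _ hcont]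
            simp only [List.length_map, Nat.zero_add]
          · rw [h3]
            simp only [List.length_append, List.length_cons, List.length_nil]
            push_cast; ring
          · rw [h4, hdk]
            simp only [List.length_append, List.length_cons, List.length_nil]
            push_cast; ring

-- ===== VERDICT (by name: the statement is the Claim_ definition above) =====
theorem clean_relations_spec : Claim_equal_clean_relations := by
  intro items _
  unfold Spec_clean_relations clean_relations clean_relations_alt
  obtain ⟨h1, _, h3, h4⟩ := AInv_all items
  dsimp only
  rw [emit_spec]
  refine Prod.ext ?_ (Prod.ext ?_ ?_)
  · rw [h1]
    apply List.map_congr_left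
    intro k _
    congr 1
    rw [PySem.Dict.getD_eq_get?_getD, fd_get? (keptOf items) k]
    by_cases h : firstDesc (keptOf items) k = "" <;> simp [h]
  · rw [h3]; simp
  · rw [h4]; simp
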